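-- pv_equiv track=rewrite | github.com/shaneholloman/hegelion | src/hegelion_server/dialectics.py | _strip_markdown_wrappers
-- ===== SOURCE A (Python) =====
-- def _strip_markdown_wrappers(text: str) -> str:
--     trimmed = text.strip()
--     if not trimmed:
--         return ""
--     markers = ("**", "__", "*", "_")
--     changed = True
--     while changed and trimmed:
--         changed = False
--         for marker in markers:
--             if trimmed.startswith(marker) and trimmed.endswith(marker) and len(trimmed) > 2 * len(marker):
--                 trimmed = trimmed[len(marker) : -len(marker)].strip()
--                 changed = True
--     return trimmed
-- ===== SOURCE B (Python) =====
-- def _strip_markdown_wrappers(text: str) -> str: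
--     s = text.strip()
--     if not s:
--         return ""
--     for marker in ("**", "__", "*", "_"):
--         if s.startswith(marker) and s.endswith(marker) and len(s) > 2 * len(marker):
--             return _strip_markdown_wrappers(s[len(marker):-len(marker)])
--     return s
-- ===== Notes on version B (the rewrite author's own statement) =====
-- stated objective: simpler
-- what changed: Replaces the while/changed fixpoint loop threading a mutable flag with a direct recursive peeler that strips one wrapper layer per call and recurses, keeping the marker priority order, the len > 2*len(marker) guard and the per-layer strip.
import Mathlib
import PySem

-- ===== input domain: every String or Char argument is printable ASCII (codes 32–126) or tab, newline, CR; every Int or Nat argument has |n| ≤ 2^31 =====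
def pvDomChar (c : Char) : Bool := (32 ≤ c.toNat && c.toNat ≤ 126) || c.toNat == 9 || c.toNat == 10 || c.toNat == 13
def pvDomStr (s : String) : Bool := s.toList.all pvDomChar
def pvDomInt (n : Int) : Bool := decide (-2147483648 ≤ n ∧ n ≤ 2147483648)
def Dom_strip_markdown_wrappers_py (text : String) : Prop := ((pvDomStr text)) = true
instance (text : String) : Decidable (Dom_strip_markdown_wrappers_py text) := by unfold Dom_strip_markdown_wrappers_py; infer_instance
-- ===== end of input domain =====

-- B replaces A's while/changed fixpoint loop by a recursive peeler (same marker order, same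
-- length guard, same per-layer strip); objective: simpler. Proved extensionally equal on all inputs.

-- Helpers shared by both ports: both Python versions contain literally the same marker tuple,
-- the same guard `startswith and endswith and len > 2*len(marker)` and the same slice
-- `s[len(marker):-len(marker)]`.
def pvMarkers : List (List Char) := [['*', '*'], ['_', '_'], ['*'], ['_']]

def pvApplies (t m : List Char) : Bool :=
  PySem.Chars.startswith t m && PySem.Chars.endswith t m && decide (2 * m.length < t.length)

def pvPeel (t m : List Char) : List Char :=
  PySem.List.slice t (some (m.length : Int)) (some (-(m.length : Int)))

-- (lemmas here only because the ports' termination cites them by name)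
lemma pvStrip_len_le (s : List Char) : (PySem.Chars.strip s).length ≤ s.length := by
  have h1 : (PySem.Chars.lstrip s).length ≤ s.length := by
    simpa [PySem.Chars.lstrip] using s.length_dropWhile_le PySem.Chars.isspace
  have h2 : (PySem.Chars.rstrip (PySem.Chars.lstrip s)).length ≤ (PySem.Chars.lstrip s).length := by
    simpa [PySem.Chars.rstrip] using
      (PySem.Chars.lstrip s).reverse.length_dropWhile_le PySem.Chars.isspace
  exact le_trans h2 h1

lemma pvPeel_len_lt {t m : List Char} (h : pvApplies t m = true) :
    (pvPeel t m).length < t.length := by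
  have hlen : 2 * m.length < t.length := by
    simp only [pvApplies, Bool.and_eq_true, decide_eq_true_eq] at h
    exact h.2
  rcases Nat.eq_zero_or_pos m.length with h0 | hpos
  · simp [pvPeel, PySem.List.slice, PySem.List.clampIdx, h0]; omega
  · have hc : PySem.List.clampIdx t.length (-(m.length : Int)) = t.length - m.length :=
      PySem.List.clampIdx_neg_natCast _ _ hpos
    have hc2 : PySem.List.clampIdx t.length (m.length : Int) = min m.length t.length := by
      simp [PySem.List.clampIdx]
    simp [pvPeel, PySem.List.slice, hc]
    omega

-- A's inner `for marker in markers:` loop, threading (trimmed, changed)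
def pvPassA : List (List Char) → List Char × Bool → List Char × Bool
  | [], st => st
  | m :: ms, (t, ch) =>
    if pvApplies t m then pvPassA ms (PySem.Chars.strip (pvPeel t m), true)
    else pvPassA ms (t, ch)

lemma pvPassA_fst_le : ∀ (ms : List (List Char)) (t : List Char) (ch : Bool),
    (pvPassA ms (t, ch)).1.length ≤ t.length := by
  intro ms
  induction ms with
  | nil => intro t ch; simp [pvPassA]
  | cons m ms ih =>
    intro t ch
    by_cases h : pvApplies t m = true
    · simp only [pvPassA, h, if_true]
      exact le_trans (ih _ true)
        (le_trans (pvStrip_len_le _) (le_of_lt (pvPeel_len_lt h)))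
    · simp only [pvPassA, h]; exact ih t ch

lemma pvPassA_false_lt : ∀ (ms : List (List Char)) (t : List Char),
    (pvPassA ms (t, false)).2 = true → (pvPassA ms (t, false)).1.length < t.length := by
  intro ms
  induction ms with
  | nil => intro t h; simp [pvPassA] at h
  | cons m ms ih =>
    intro t h
    by_cases hap : pvApplies t m = true
    · simp only [pvPassA, hap, if_true]
      exact lt_of_le_of_lt (pvPassA_fst_le ms _ true)
        (lt_of_le_of_lt (pvStrip_len_le _) (pvPeel_len_lt hap))
    · simp only [pvPassA, hap] at h ⊢; exact ih t h

-- ===== PORT A =====  (the while/changed fixpoint loop)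
def pvWhileA (t : List Char) : List Char :=
  let r := pvPassA pvMarkers (t, false)
  if h : r.2 = true then pvWhileA r.1 else r.1
termination_by t.length
decreasing_by exact pvPassA_false_lt pvMarkers t h

def strip_markdown_wrappers_py (text : String) : String :=
  let trimmed := PySem.Chars.strip text.toList
  if trimmed = [] then "" else String.mk (pvWhileA trimmed)

-- ===== PORT B =====  (the recursive peeler: first applicable marker, then recurse)
def pvFindMarker : List (List Char) → List Char → Option (List Char)
  | [], _ => none
  | m :: ms, s => if pvApplies s m then some m else pvFindMarker ms s

lemma pvFindMarker_applies : ∀ (ms : List (List Char)) (s m : List Char),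
    pvFindMarker ms s = some m → pvApplies s m = true := by
  intro ms
  induction ms with
  | nil => intro s m h; simp [pvFindMarker] at h
  | cons m' ms ih =>
    intro s m h
    by_cases hap : pvApplies s m' = true
    · simp only [pvFindMarker, hap, if_true, Option.some.injEq] at h; subst h; exact hap
    · simp only [pvFindMarker, hap] at h; exact ih s m h

def pvPeelB (t : List Char) : List Char :=
  let s := PySem.Chars.strip t
  if s = [] then []
  else
    match hm : pvFindMarker pvMarkers s with
    | some m => pvPeelB (pvPeel s m)
    | none => s
termination_by t.length
decreasing_by
  exact lt_of_lt_of_le (pvPeel_len_lt (pvFindMarker_applies _ _ _ hm)) (pvStrip_len_le t)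

def strip_markdown_wrappers_py_alt (text : String) : String :=
  String.mk (pvPeelB text.toList)

-- ===== PRECONDITION & SPEC =====
def Spec_strip_markdown_wrappers_py (text : String) (out : String) : Prop := out = strip_markdown_wrappers_py_alt text
instance (text : String) (out : String) : Decidable (Spec_strip_markdown_wrappers_py text out) := by unfold Spec_strip_markdown_wrappers_py; infer_instance

-- ===== CLAIM (what is proved, stated in full; the proofs are below) =====
def Claim_equal_strip_markdown_wrappers_py : Prop := ∀ (text : String), Dom_strip_markdown_wrappers_py text → Spec_strip_markdown_wrappers_py text (strip_markdown_wrappers_py text)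

-- ===== LEMMAS AND PROOFS =====

lemma pvWhileA_eq (t : List Char) : pvWhileA t =
    (let r := pvPassA pvMarkers (t, false)
     if r.2 = true then pvWhileA r.1 else r.1) := by
  rw [pvWhileA]; simp [dite_eq_ite]

lemma pvPeelB_nil {t : List Char} (h : PySem.Chars.strip t = []) : pvPeelB t = [] := by
  rw [pvPeelB]; simp [h]

lemma pvPeelB_some {t m : List Char} (hne : PySem.Chars.strip t ≠ [])
    (h : pvFindMarker pvMarkers (PySem.Chars.strip t) = some m) :
    pvPeelB t = pvPeelB (pvPeel (PySem.Chars.strip t) m) := by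
  rw [pvPeelB, if_neg hne]
  split
  · next m' hm => rw [h] at hm; cases hm; rfl
  · next hm => rw [h] at hm; cases hm

lemma pvPeelB_none {t : List Char} (hne : PySem.Chars.strip t ≠ [])
    (h : pvFindMarker pvMarkers (PySem.Chars.strip t) = none) :
    pvPeelB t = PySem.Chars.strip t := by
  rw [pvPeelB, if_neg hne]
  split
  · next m' hm => rw [h] at hm; cases hm
  · next hm => rfl

-- strip facts
lemma pvStrip_eq_self {s : List Char} {a b : Char} (ha : s.head? = some a)
    (hb : s.getLast? = some b) (hna : PySem.Chars.isspace a = false)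
    (hnb : PySem.Chars.isspace b = false) : PySem.Chars.strip s = s := by
  obtain ⟨t, rfl⟩ : ∃ t, s = a :: t := by
    cases s with
    | nil => cases ha
    | cons x t => simp only [List.head?_cons, Option.some.injEq] at ha; exact ⟨t, by rw [ha]⟩
  have hl : PySem.Chars.lstrip (a :: t) = a :: t := by
    simp [PySem.Chars.lstrip, hna]
  have hrev : (a :: t).reverse.head? = some b := by rw [List.head?_reverse]; exact hb
  obtain ⟨r, hr⟩ : ∃ r, (a :: t).reverse = b :: r := by
    cases h' : (a :: t).reverse with
    | nil => rw [h'] at hrev; cases hrev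
    | cons x r =>
      rw [h'] at hrev; simp only [List.head?_cons, Option.some.injEq] at hrev
      exact ⟨r, by rw [hrev]⟩
  have hR : PySem.Chars.rstrip (a :: t) = a :: t := by
    rw [PySem.Chars.rstrip, hr, List.dropWhile_cons]
    simp only [hnb, Bool.false_eq_true, if_false]
    rw [← hr, List.reverse_reverse]
  rw [PySem.Chars.strip, hl, hR]

lemma pvRstrip_prefix (x : List Char) : PySem.Chars.rstrip x <+: x := by
  obtain ⟨w, hw⟩ := List.dropWhile_suffix (l := x.reverse) PySem.Chars.isspace
  refine ⟨w.reverse, ?_⟩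
  rw [PySem.Chars.rstrip, ← List.reverse_append, hw, List.reverse_reverse]

lemma pvStrip_idem (s : List Char) :
    PySem.Chars.strip (PySem.Chars.strip s) = PySem.Chars.strip s := by
  cases h : PySem.Chars.strip s with
  | nil => rfl
  | cons a t =>
    have hpre := pvRstrip_prefix (PySem.Chars.lstrip s)
    rw [show PySem.Chars.rstrip (PySem.Chars.lstrip s) = PySem.Chars.strip s from rfl, h] at hpre
    obtain ⟨w, hw⟩ := hpre
    have hhead : (PySem.Chars.lstrip s).head? = some a := by
      rw [← hw, List.cons_append, List.head?_cons]
    have hna : PySem.Chars.isspace a = false := by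
      have h2 := List.head?_dropWhile_not PySem.Chars.isspace s
      rw [show List.dropWhile PySem.Chars.isspace s = PySem.Chars.lstrip s from rfl, hhead] at h2
      exact h2
    -- the last char of strip s is the head of dropWhile on the reversed lstrip
    have hstrip_def : PySem.Chars.strip s =
        (List.dropWhile PySem.Chars.isspace (PySem.Chars.lstrip s).reverse).reverse := rfl
    have hne : List.dropWhile PySem.Chars.isspace (PySem.Chars.lstrip s).reverse ≠ [] := by
      intro hnil
      rw [hstrip_def, hnil] at h; cases h
    obtain ⟨b, r, hbr⟩ : ∃ b r, List.dropWhile PySem.Chars.isspace (PySem.Chars.lstrip s).reverse = b :: r := by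
      cases h' : List.dropWhile PySem.Chars.isspace (PySem.Chars.lstrip s).reverse with
      | nil => exact absurd h' hne
      | cons b r => exact ⟨b, r, rfl⟩
    have hnb : PySem.Chars.isspace b = false := by
      have h2 := List.head?_dropWhile_not PySem.Chars.isspace (PySem.Chars.lstrip s).reverse
      rw [hbr] at h2; exact h2
    have hlast : (PySem.Chars.strip s).getLast? = some b := by
      rw [hstrip_def, hbr, List.getLast?_reverse, List.head?_cons]
    rw [← h]
    exact pvStrip_eq_self (by rw [h, List.head?_cons]) hlast hna hnb

lemma pvPeelB_strip (t : List Char) : pvPeelB (PySem.Chars.strip t) = pvPeelB t := by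
  by_cases h : PySem.Chars.strip t = []
  · rw [pvPeelB_nil (by rw [pvStrip_idem, h]), pvPeelB_nil h]
  · cases hf : pvFindMarker pvMarkers (PySem.Chars.strip t) with
    | some m =>
      rw [pvPeelB_some (t := PySem.Chars.strip t) (by rw [pvStrip_idem]; exact h)
          (by rw [pvStrip_idem]; exact hf),
        pvPeelB_some h hf, pvStrip_idem]
    | none =>
      rw [pvPeelB_none (t := PySem.Chars.strip t) (by rw [pvStrip_idem]; exact h)
          (by rw [pvStrip_idem]; exact hf),
        pvPeelB_none h hf, pvStrip_idem]

-- peel decomposition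
lemma pvPeel_concat {m w : List Char} (hm : m ≠ []) : pvPeel (m ++ w ++ m) m = w := by
  have hpos : 0 < m.length := List.length_pos_iff.mpr hm
  have hlen : (m ++ w ++ m).length = m.length + w.length + m.length := by
    simp only [List.length_append]
  have hc : PySem.List.clampIdx (m ++ w ++ m).length (-(m.length : Int)) =
      (m ++ w ++ m).length - m.length := PySem.List.clampIdx_neg_natCast _ _ hpos
  have ha : PySem.List.clampIdx (m ++ w ++ m).length (m.length : Int) = m.length := by
    simp only [PySem.List.clampIdx]
    rw [if_neg (by omega)]
    simp only [Int.toNat_natCast]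
    omega
  simp only [pvPeel, PySem.List.slice, hc, ha]
  rw [show List.drop m.length (m ++ w ++ m) = w ++ m from by
      rw [List.append_assoc]; exact List.drop_left,
    show (m ++ w ++ m).length - m.length - m.length = w.length from by rw [hlen]; omega]
  exact List.take_left

lemma pvApplies_len {t m : List Char} (h : pvApplies t m = true) : 2 * m.length < t.length := by
  simp only [pvApplies, Bool.and_eq_true, decide_eq_true_eq] at h
  exact h.2

lemma pvDecomp {s m : List Char} (hm : m ≠ []) (h : pvApplies s m = true) :
    s = m ++ pvPeel s m ++ m := by
  have hlen := pvApplies_len h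
  simp only [pvApplies, Bool.and_eq_true, decide_eq_true_eq,
    PySem.Chars.startswith_iff, PySem.Chars.endswith_iff] at h
  obtain ⟨⟨hp, hsu⟩, -⟩ := h
  obtain ⟨u, hu⟩ := hp
  obtain ⟨v, hv⟩ := hsu
  have hvlen : m.length ≤ v.length := by
    have := congrArg List.length hv
    simp only [List.length_append] at this
    omega
  have hu' : u = v.drop m.length ++ m := by
    have h1 : s.drop m.length = u := by rw [← hu]; exact List.drop_left
    have h2 : (v ++ m).drop m.length = v.drop m.length ++ m :=
      List.drop_append_of_le_length hvlen
    rw [← h1, ← hv, h2]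
  have hs : s = m ++ v.drop m.length ++ m := by
    rw [← hu, hu', List.append_assoc]
  rw [hs, pvPeel_concat hm]

lemma pvApplies_head {s m : List Char} {c : Char} (hc : m.head? = some c)
    (h : pvApplies s m = true) : s.head? = some c := by
  simp only [pvApplies, Bool.and_eq_true, decide_eq_true_eq,
    PySem.Chars.startswith_iff, PySem.Chars.endswith_iff] at h
  obtain ⟨⟨⟨u, hu⟩, -⟩, -⟩ := h
  cases m with
  | nil => cases hc
  | cons x m' =>
    simp only [List.head?_cons, Option.some.injEq] at hc
    rw [← hu, List.cons_append, List.head?_cons, hc]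

lemma pvApplies_of (m w : List Char) (hw : w ≠ []) : pvApplies (m ++ w ++ m) m = true := by
  simp only [pvApplies, Bool.and_eq_true, decide_eq_true_eq,
    PySem.Chars.startswith_iff, PySem.Chars.endswith_iff]
  refine ⟨⟨⟨w ++ m, by simp⟩, ⟨m ++ w, rfl⟩⟩, ?_⟩
  have := List.length_pos_iff.mpr hw
  simp only [List.length_append]
  omega

lemma pvFind_cc {c : Char} (hc : c = '*' ∨ c = '_') {t : List Char} (ht : t.head? = some c) :
    pvFindMarker pvMarkers t =
      (if pvApplies t [c, c] then some [c, c] else if pvApplies t [c] then some [c] else none) := by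
  have hno : ∀ (m' : List Char) (d : Char), m'.head? = some d → d ≠ c → pvApplies t m' = false := by
    intro m' d hm' hd
    cases hap : pvApplies t m' with
    | false => rfl
    | true =>
      have := pvApplies_head hm' hap
      rw [ht] at this
      simp only [Option.some.injEq] at this
      exact absurd this.symm hd
  rcases hc with rfl | rfl
  · simp only [pvMarkers, pvFindMarker,
      hno ['_', '_'] '_' rfl (by decide), hno ['_'] '_' rfl (by decide),
      Bool.false_eq_true, if_false]
  · simp only [pvMarkers, pvFindMarker,
      hno ['*', '*'] '*' rfl (by decide), hno ['*'] '*' rfl (by decide),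
      Bool.false_eq_true, if_false]

-- confluence: peeling any applicable marker does not change B's final answer
lemma pvConfluent : ∀ (n : Nat) (s m : List Char), s.length ≤ n →
    PySem.Chars.strip s = s → m ∈ pvMarkers → pvApplies s m = true →
    pvPeelB s = pvPeelB (pvPeel s m) := by
  intro n
  induction n with
  | zero =>
    intro s m hle _ _ hap
    have := pvApplies_len hap
    omega
  | succ n ih =>
    intro s m hle hstrip hmem hap
    have hlen := pvApplies_len hap
    have hsne : s ≠ [] := by
      intro h; rw [h] at hlen; simp at hlen
    have hard : ∀ (c : Char) (u : List Char), (c = '*' ∨ c = '_') → u.length ≤ n + 1 →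
        PySem.Chars.strip u = u → pvApplies u [c, c] = true →
        pvPeelB (pvPeel u [c, c]) = pvPeelB (pvPeel u [c]) := by
      intro c u hc hule hust hcc
      have hcsp : PySem.Chars.isspace c = false := by rcases hc with rfl | rfl <;> decide
      have hlen4 := pvApplies_len hcc
      simp only [List.length_cons, List.length_nil] at hlen4
      have hd2 := pvDecomp (m := [c, c]) (by simp) hcc
      set core := pvPeel u [c, c] with hcore
      have hulen : u.length = core.length + 4 := by
        have := congrArg List.length hd2
        simp only [List.length_append, List.length_cons, List.length_nil] at this
        omega
      have hcorepos : 0 < core.length := by omega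
      have hs1 : u = [c] ++ ([c] ++ core ++ [c]) ++ [c] := by
        rw [hd2]; simp
      have hp1 : pvPeel u [c] = [c] ++ core ++ [c] := by
        rw [hs1, pvPeel_concat (by simp)]
      rw [hp1]
      set t := [c] ++ core ++ [c] with htdef
      have htlen : t.length = core.length + 2 := by simp [htdef]
      have hthead : t.head? = some c := rfl
      have htlast : t.getLast? = some c := by
        rw [htdef]; exact List.getLast?_concat
      have htstrip : PySem.Chars.strip t = t := pvStrip_eq_self hthead htlast hcsp hcsp
      have htne : t ≠ [] := by simp [htdef]
      have hfind := pvFind_cc hc (t := t) hthead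
      have htapp1 : pvApplies t [c] = true := by
        rw [htdef]
        exact pvApplies_of [c] core (by intro h; rw [h] at hcorepos; simp at hcorepos)
      by_cases hcc' : pvApplies t [c, c] = true
      · have hd2' := pvDecomp (m := [c, c]) (by simp) hcc'
        set d := pvPeel t [c, c] with hddef
        have htlen' := pvApplies_len hcc'
        simp only [List.length_cons, List.length_nil] at htlen'
        have hcd : core = [c] ++ d ++ [c] := by
          have he : ([c] ++ core) ++ [c] = (([c] ++ ([c] ++ d ++ [c])) ++ [c]) := by
            calc ([c] ++ core) ++ [c] = t := by rw [htdef]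
              _ = [c, c] ++ d ++ [c, c] := hd2'
              _ = (([c] ++ ([c] ++ d ++ [c])) ++ [c]) := by simp
          have := List.append_cancel_right he
          simpa using this
        rw [pvPeelB_some (t := t) (by rw [htstrip]; exact htne)
            (by rw [htstrip, hfind, if_pos hcc']), htstrip]
        have hcorestrip : PySem.Chars.strip core = core :=
          pvStrip_eq_self (by rw [hcd]; rfl) (by rw [hcd]; exact List.getLast?_concat)
            hcsp hcsp
        have hdpos : 0 < d.length := by
          have := congrArg List.length hcd
          simp only [List.length_append, List.length_cons, List.length_nil] at this
          omega
        have happc : pvApplies core [c] = true := by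
          rw [hcd]
          exact pvApplies_of [c] d (by intro h; rw [h] at hdpos; simp at hdpos)
        have hihc := ih core [c] (by omega) hcorestrip
          (by rcases hc with rfl | rfl <;> simp [pvMarkers]) happc
        rw [← hddef, hihc, hcd, pvPeel_concat (by simp)]
      · rw [pvPeelB_some (t := t) (by rw [htstrip]; exact htne)
            (by rw [htstrip, hfind, if_neg hcc', if_pos htapp1]), htstrip]
        rw [show pvPeel t [c] = core from by rw [htdef, pvPeel_concat (by simp)]]
    simp only [pvMarkers, List.mem_cons, List.not_mem_nil, or_false] at hmem
    rcases hmem with rfl | rfl | rfl | rfl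
    · have ht := pvApplies_head (m := ['*', '*']) rfl hap
      have hfind := pvFind_cc (Or.inl rfl) ht
      rw [if_pos hap] at hfind
      rw [pvPeelB_some (by rw [hstrip]; exact hsne) (by rw [hstrip]; exact hfind), hstrip]
    · have ht := pvApplies_head (m := ['_', '_']) rfl hap
      have hfind := pvFind_cc (Or.inr rfl) ht
      rw [if_pos hap] at hfind
      rw [pvPeelB_some (by rw [hstrip]; exact hsne) (by rw [hstrip]; exact hfind), hstrip]
    · have ht := pvApplies_head (m := ['*']) rfl hap
      have hfind := pvFind_cc (Or.inl rfl) ht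
      by_cases hcc : pvApplies s ['*', '*'] = true
      · rw [if_pos hcc] at hfind
        rw [pvPeelB_some (by rw [hstrip]; exact hsne) (by rw [hstrip]; exact hfind), hstrip]
        exact hard '*' s (Or.inl rfl) hle hstrip hcc
      · rw [if_neg hcc, if_pos hap] at hfind
        rw [pvPeelB_some (by rw [hstrip]; exact hsne) (by rw [hstrip]; exact hfind), hstrip]
    · have ht := pvApplies_head (m := ['_']) rfl hap
      have hfind := pvFind_cc (Or.inr rfl) ht
      by_cases hcc : pvApplies s ['_', '_'] = true
      · rw [if_pos hcc] at hfind
        rw [pvPeelB_some (by rw [hstrip]; exact hsne) (by rw [hstrip]; exact hfind), hstrip]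
        exact hard '_' s (Or.inr rfl) hle hstrip hcc
      · rw [if_neg hcc, if_pos hap] at hfind
        rw [pvPeelB_some (by rw [hstrip]; exact hsne) (by rw [hstrip]; exact hfind), hstrip]

lemma pvPassA_snd_true : ∀ (ms : List (List Char)) (t : List Char),
    (pvPassA ms (t, true)).2 = true := by
  intro ms
  induction ms with
  | nil => intro t; rfl
  | cons m ms ih =>
    intro t
    by_cases hap : pvApplies t m = true
    · simp only [pvPassA, hap, if_true]; exact ih _
    · simp only [pvPassA, hap]; exact ih t

lemma pvPass_false_find : ∀ (ms : List (List Char)) (u : List Char),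
    (pvPassA ms (u, false)).2 = false → pvFindMarker ms u = none := by
  intro ms
  induction ms with
  | nil => intro u _; rfl
  | cons m ms ih =>
    intro u h
    by_cases hap : pvApplies u m = true
    · exfalso
      have ht := pvPassA_snd_true ms (PySem.Chars.strip (pvPeel u m))
      simp only [pvPassA, hap, if_true] at h
      rw [h] at ht; exact Bool.false_ne_true ht
    · simp only [pvPassA, hap] at h
      simp only [pvFindMarker, hap]
      exact ih u h

lemma pvPassA_false_eq : ∀ (ms : List (List Char)) (u : List Char),
    (pvPassA ms (u, false)).2 = false → (pvPassA ms (u, false)).1 = u := by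
  intro ms
  induction ms with
  | nil => intro u _; rfl
  | cons m ms ih =>
    intro u h
    by_cases hap : pvApplies u m = true
    · exfalso
      have ht := pvPassA_snd_true ms (PySem.Chars.strip (pvPeel u m))
      simp only [pvPassA, hap, if_true] at h
      rw [h] at ht; exact Bool.false_ne_true ht
    · simp only [pvPassA, hap] at h ⊢
      exact ih u h

lemma pvLoopEq : ∀ (n : Nat) (s : List Char), s.length ≤ n →
    PySem.Chars.strip s = s → pvWhileA s = pvPeelB s := by
  intro n
  induction n with
  | zero =>
    intro s hle _
    have hnil : s = [] := by cases s with | nil => rfl | cons a t => simp at hle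
    subst hnil
    rw [pvWhileA_eq]
    have hpass : pvPassA pvMarkers (([] : List Char), false) = ([], false) := by decide
    rw [hpass]
    simp only [Bool.false_eq_true, if_false]
    exact (pvPeelB_nil rfl).symm
  | succ n ih =>
    intro s hle hstrip
    have hGL : ∀ (ms : List (List Char)), (∀ m ∈ ms, m ∈ pvMarkers) →
        ∀ u, PySem.Chars.strip u = u → u.length ≤ n →
        pvWhileA (pvPassA ms (u, true)).1 = pvPeelB u := by
      intro ms
      induction ms with
      | nil => intro _ u hu hle'; exact ih u hle' hu
      | cons m ms ihms =>
        intro hsub u hu hle'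
        by_cases hap : pvApplies u m = true
        · simp only [pvPassA, hap, if_true]
          have hv : (PySem.Chars.strip (pvPeel u m)).length ≤ n := by
            have h1 := pvPeel_len_lt hap
            have h2 := pvStrip_len_le (pvPeel u m)
            omega
          rw [ihms (fun m' hm' => hsub m' (List.mem_cons_of_mem _ hm')) _ (pvStrip_idem _) hv]
          rw [pvPeelB_strip]
          exact (pvConfluent u.length u m le_rfl hu (hsub m List.mem_cons_self) hap).symm
        · simp only [pvPassA, hap]
          exact ihms (fun m' hm' => hsub m' (List.mem_cons_of_mem _ hm')) u hu hle'
    have hGL2 : ∀ (ms : List (List Char)), (∀ m ∈ ms, m ∈ pvMarkers) →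
        ∀ u, PySem.Chars.strip u = u → u.length ≤ n + 1 →
        (pvPassA ms (u, false)).2 = true →
        pvWhileA (pvPassA ms (u, false)).1 = pvPeelB u := by
      intro ms
      induction ms with
      | nil => intro _ u _ _ h; simp [pvPassA] at h
      | cons m ms ihms =>
        intro hsub u hu hle' hch
        by_cases hap : pvApplies u m = true
        · simp only [pvPassA, hap, if_true] at hch ⊢
          have hv : (PySem.Chars.strip (pvPeel u m)).length ≤ n := by
            have h1 := pvPeel_len_lt hap
            have h2 := pvStrip_len_le (pvPeel u m)
            omega
          rw [hGL ms (fun m' hm' => hsub m' (List.mem_cons_of_mem _ hm')) _ (pvStrip_idem _) hv]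
          rw [pvPeelB_strip]
          exact (pvConfluent u.length u m le_rfl hu (hsub m List.mem_cons_self) hap).symm
        · simp only [pvPassA, hap] at hch ⊢
          exact ihms (fun m' hm' => hsub m' (List.mem_cons_of_mem _ hm')) u hu hle' hch
    rw [pvWhileA_eq]
    by_cases hch : (pvPassA pvMarkers (s, false)).2 = true
    · simp only [hch, if_true]
      exact hGL2 pvMarkers (fun m hm => hm) s hstrip hle hch
    · have hb : (pvPassA pvMarkers (s, false)).2 = false := by
        cases h' : (pvPassA pvMarkers (s, false)).2 with
        | false => rfl
        | true => exact absurd h' hch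
      simp only [hb, Bool.false_eq_true, if_false]
      rw [pvPassA_false_eq pvMarkers s hb]
      by_cases hnil : s = []
      · subst hnil; exact (pvPeelB_nil rfl).symm
      · rw [pvPeelB_none (by rw [hstrip]; exact hnil)
          (by rw [hstrip]; exact pvPass_false_find pvMarkers s hb), hstrip]

-- ===== VERDICT (by name: the statement is the Claim_ definition above) =====
theorem strip_markdown_wrappers_py_spec : Claim_equal_strip_markdown_wrappers_py := by
  intro text _
  unfold Spec_strip_markdown_wrappers_py strip_markdown_wrappers_py strip_markdown_wrappers_py_alt
  by_cases h : PySem.Chars.strip text.toList = []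
  · simp only [h, if_true]
    rw [show pvPeelB text.toList = [] from pvPeelB_nil h]
    rfl
  · rw [if_neg h, ← pvPeelB_strip text.toList,
      pvLoopEq (PySem.Chars.strip text.toList).length (PySem.Chars.strip text.toList) le_rfl
        (pvStrip_idem text.toList)]
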